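-- pv_equiv track=rewrite | github.com/mitul-goswami/AgenticAML | agents/input_parser.py | _process_multi_value_field
-- ===== SOURCE A (Python) =====
-- from typing import Dict, List, Optional
--
-- def _process_multi_value_field(value: str) -> List[str]:
--     """Process fields that can contain multiple values (comma-separated)"""
--     if not value or value.lower() in ['n/a', 'none', 'null', '']:
--         return []
--
--     # Split by common delimiters
--     delimiters = [',', ';', '|', '\n']
--     items = [value]
--
--     for delimiter in delimiters:
--         new_items = []
--         for item in items:
--             new_items.extend(item.split(delimiter))
--         items = new_items
--
--     # Clean and filter items
--     cleaned_items = []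
--     for item in items:
--         item = item.strip()
--         if item and item.lower() not in ['', 'n/a', 'none', 'null']:
--             cleaned_items.append(item)
--
--     return cleaned_items if cleaned_items else []
-- ===== SOURCE B (Python) =====
-- from typing import List
--
-- _DELIMITERS = ',;|\n'
-- _SENTINELS = ('n/a', 'none', 'null')
--
-- def _process_multi_value_field(value: str) -> List[str]:
--     """Single character-level pass: build tokens while scanning, clean+emit each as it closes."""
--     if not value or value.lower() in ['n/a', 'none', 'null', '']:
--         return []
--     cleaned = []
--     token = ''
--     for ch in value:
--         if ch in _DELIMITERS:
--             tok = token.strip()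
--             if tok and tok.lower() not in _SENTINELS:
--                 cleaned.append(tok)
--             token = ''
--         else:
--             token += ch
--     tok = token.strip()
--     if tok and tok.lower() not in _SENTINELS:
--         cleaned.append(tok)
--     return cleaned
-- ===== Notes on version B (the rewrite author's own statement) =====
-- stated objective: alternative
-- what changed: Replaces the nested multi-pass splitting (re-splitting the whole item list once per delimiter, then a separate cleaning pass) by a single character-level scan that accumulates tokens and cleans/emits each token as its delimiter is reached.
import Mathlib
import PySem

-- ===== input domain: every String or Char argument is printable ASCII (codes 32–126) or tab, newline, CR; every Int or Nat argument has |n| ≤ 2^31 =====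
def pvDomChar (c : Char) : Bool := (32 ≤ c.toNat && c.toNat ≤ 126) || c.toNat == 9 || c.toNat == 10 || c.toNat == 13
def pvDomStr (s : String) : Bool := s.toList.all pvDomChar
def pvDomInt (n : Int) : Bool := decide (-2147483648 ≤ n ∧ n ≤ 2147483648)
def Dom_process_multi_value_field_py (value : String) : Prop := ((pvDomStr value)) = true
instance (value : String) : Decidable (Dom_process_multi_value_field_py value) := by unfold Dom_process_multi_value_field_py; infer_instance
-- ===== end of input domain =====

-- B replaces A's nested multi-pass splitting (one re-split of the whole item list per
-- delimiter, then a separate cleaning pass) by a single character-level scan that builds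
-- tokens and cleans/emits each one as its delimiter is reached (objective: alternative).


-- ===== PORT A =====
-- item.split(delimiter) for the non-empty single-char delimiters is exactly
-- PySem.Chars.splitOn on the character lists (Str.split? sep = some of this for sep ≠ "").
def process_multi_value_field_py (value : String) : List String :=
  if value = "" ∨ PySem.Str.lower value ∈ (["n/a", "none", "null", ""] : List String) then []
  else
    let delimiters : List String := [",", ";", "|", "\n"]
    let items := delimiters.foldl (fun items delimiter =>
      items.foldl (fun new_items item =>
        new_items ++ (PySem.Chars.splitOn item.toList delimiter.toList).map String.ofList) []) [value]
    let cleaned_items := items.foldl (fun cleaned_items item =>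
      let item := PySem.Str.strip item
      if item ≠ "" ∧ PySem.Str.lower item ∉ (["", "n/a", "none", "null"] : List String)
      then cleaned_items ++ [item] else cleaned_items) []
    if cleaned_items ≠ [] then cleaned_items else []

-- ===== PORT B =====
def pvDelims : List Char := [',', ';', '|', '\n']
def pvSentinels : List (List Char) := ["n/a".toList, "none".toList, "null".toList]
-- B's "strip the closed token, keep it unless empty or a sentinel" step
def pvEmit (acc : List String) (token : List Char) : List String :=
  let tok := PySem.Chars.strip token
  if tok ≠ [] ∧ PySem.Chars.lower tok ∉ pvSentinels then acc ++ [String.ofList tok] else acc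
def process_multi_value_field_py_alt (value : String) : List String :=
  if value = "" ∨ PySem.Str.lower value ∈ (["n/a", "none", "null", ""] : List String) then []
  else
    let st := value.toList.foldl (fun (st : List String × List Char) ch =>
      if ch ∈ pvDelims then (pvEmit st.1 st.2, []) else (st.1, st.2 ++ [ch])) ([], [])
    pvEmit st.1 st.2

-- ===== PRECONDITION & SPEC =====
def Spec_process_multi_value_field_py (value : String) (out : List String) : Prop := out = process_multi_value_field_py_alt value
instance (value : String) (out : List String) : Decidable (Spec_process_multi_value_field_py value out) := by unfold Spec_process_multi_value_field_py; infer_instance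

-- ===== CLAIM (what is proved, stated in full; the proofs are below) =====
def Claim_equal_process_multi_value_field_py : Prop := ∀ (value : String), Dom_process_multi_value_field_py value → Spec_process_multi_value_field_py value (process_multi_value_field_py value)

-- ===== LEMMAS AND PROOFS =====

-- apply f to the head piece only
def mapHd (f : List Char → List Char) : List (List Char) → List (List Char)
  | [] => []
  | t :: ts => f t :: ts

-- split a character list at every character of ds
def splitAny (ds : List Char) : List Char → List (List Char)
  | [] => [[]]
  | c :: cs => if c ∈ ds then [] :: splitAny ds cs else mapHd (c :: ·) (splitAny ds cs)

theorem splitAny_ne_nil (ds cs) : splitAny ds cs ≠ [] := by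
  induction cs with
  | nil => simp [splitAny]
  | cons c cs ih =>
    simp only [splitAny]
    split
    · simp
    · cases h : splitAny ds cs with
      | nil => exact absurd h ih
      | cons t ts => simp [mapHd]

theorem mapHd_nil_append (xs : List (List Char)) : mapHd (fun t => [] ++ t) xs = xs := by
  cases xs <;> simp [mapHd]

theorem mapHd_append (f : List Char → List Char) (xs ys : List (List Char)) (h : xs ≠ []) :
    mapHd f (xs ++ ys) = mapHd f xs ++ ys := by
  cases xs with
  | nil => exact absurd rfl h
  | cons t ts => simp [mapHd]

theorem splitOn_go_spec (d : Char) (l : List Char) :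
    ∀ (fuel : Nat) (cur : List Char) (acc : List (List Char)), l.length ≤ fuel →
      PySem.Chars.splitOn.go [d] fuel l cur acc
        = acc.reverse ++ mapHd (fun t => cur.reverse ++ t) (splitAny [d] l) := by
  induction l with
  | nil =>
    intro fuel cur acc _
    cases fuel <;> simp [PySem.Chars.splitOn.go, splitAny, mapHd]
  | cons c rest ih =>
    intro fuel cur acc hfuel
    cases fuel with
    | zero => simp at hfuel
    | succ f =>
      simp only [PySem.Chars.splitOn.go]
      by_cases hc : c = d
      · have hpre : ([d] : List Char).isPrefixOf (c :: rest) = true := by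
          simp [List.isPrefixOf, hc]
        rw [if_pos hpre]
        have hdrop : List.drop ([d] : List Char).length (c :: rest) = rest := by simp
        rw [hdrop, ih f [] (cur.reverse :: acc) (by simpa using Nat.le_of_succ_le_succ hfuel)]
        simp only [splitAny, hc, List.mem_singleton]
        simp [mapHd]
        cases splitAny [d] rest <;> rfl
      · have hpre : ([d] : List Char).isPrefixOf (c :: rest) = false := by
          simp [List.isPrefixOf]
          exact fun h => hc h.symm
        rw [if_neg (by simp [hpre])]
        rw [ih f (c :: cur) acc (by simpa using Nat.le_of_succ_le_succ hfuel)]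
        have hsp : splitAny [d] (c :: rest) = mapHd (c :: ·) (splitAny [d] rest) := by
          simp [splitAny, hc]
        rw [hsp]
        congr 1
        cases h : splitAny [d] rest with
        | nil => exact absurd h (splitAny_ne_nil _ _)
        | cons t ts => simp [mapHd]

theorem splitOn_eq_splitAny (cs : List Char) (d : Char) :
    PySem.Chars.splitOn cs [d] = splitAny [d] cs := by
  unfold PySem.Chars.splitOn
  rw [splitOn_go_spec d cs (cs.length + 1) [] [] (Nat.le_succ _)]
  simp
  cases splitAny [d] cs <;> rfl

theorem flatMap_splitAny (d : Char) (ds cs : List Char) :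
    (splitAny ds cs).flatMap (splitAny [d]) = splitAny (ds ++ [d]) cs := by
  induction cs with
  | nil => simp [splitAny]
  | cons c cs ih =>
    by_cases hmem : c ∈ ds
    · have h1 : splitAny ds (c :: cs) = [] :: splitAny ds cs := by simp [splitAny, hmem]
      have h2 : splitAny (ds ++ [d]) (c :: cs) = [] :: splitAny (ds ++ [d]) cs := by
        simp [splitAny, hmem]
      rw [h1, h2, ← ih]
      simp [List.flatMap, splitAny]
    · by_cases hd : c = d
      · have h1 : splitAny ds (c :: cs) = mapHd (c :: ·) (splitAny ds cs) := by
          simp [splitAny, hmem]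
        have h2 : splitAny (ds ++ [d]) (c :: cs) = [] :: splitAny (ds ++ [d]) cs := by
          simp [splitAny, hd]
        rw [h1, h2, ← ih]
        cases h : splitAny ds cs with
        | nil => exact absurd h (splitAny_ne_nil _ _)
        | cons t ts =>
          simp only [mapHd, List.flatMap_cons]
          have hsp : splitAny [d] (c :: t) = [] :: splitAny [d] t := by simp [splitAny, hd]
          simp [hsp, List.flatMap]
      · have h1 : splitAny ds (c :: cs) = mapHd (c :: ·) (splitAny ds cs) := by
          simp [splitAny, hmem]
        have h2 : splitAny (ds ++ [d]) (c :: cs) = mapHd (c :: ·) (splitAny (ds ++ [d]) cs) := by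
          simp [splitAny, hmem, hd]
        rw [h1, h2, ← ih]
        cases h : splitAny ds cs with
        | nil => exact absurd h (splitAny_ne_nil _ _)
        | cons t ts =>
          simp only [mapHd, List.flatMap_cons]
          have hne := splitAny_ne_nil [d] t
          have hsp : splitAny [d] (c :: t) = mapHd (c :: ·) (splitAny [d] t) := by
            simp [splitAny, hd]
          rw [hsp, ← mapHd_append _ _ _ hne]
          rfl

theorem ofList_eq_iff (x : List Char) (s : String) : String.ofList x = s ↔ x = s.toList := by
  rw [String.ext_iff]; simp

theorem lower_ofList (a : List Char) :
    PySem.Str.lower (String.ofList a) = String.ofList (PySem.Chars.lower a) := by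
  rw [String.ext_iff]
  simp [PySem.Str.toList_lower]

theorem strip_ofList (l : List Char) :
    PySem.Str.strip (String.ofList l) = String.ofList (PySem.Chars.strip l) := by
  rw [String.ext_iff]
  simp [PySem.Str.toList_strip]

theorem mem_four_iff (a : List Char) :
    (String.ofList a ∈ (["", "n/a", "none", "null"] : List String))
      ↔ (a = [] ∨ a ∈ pvSentinels) := by
  simp only [pvSentinels, List.mem_cons, List.not_mem_nil, or_false, ofList_eq_iff]
  exact Iff.rfl

-- A's cleaning step on a piece (as a String) is B's pvEmit on the character list
theorem emitA_eq_pvEmit (acc : List String) (l : List Char) :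
    (if PySem.Str.strip (String.ofList l) ≠ "" ∧
        PySem.Str.lower (PySem.Str.strip (String.ofList l)) ∉ (["", "n/a", "none", "null"] : List String)
     then acc ++ [PySem.Str.strip (String.ofList l)] else acc) = pvEmit acc l := by
  rw [strip_ofList]
  unfold pvEmit
  refine if_congr ?_ rfl rfl
  have hne : String.ofList (PySem.Chars.strip l) = "" ↔ PySem.Chars.strip l = [] := by
    rw [ofList_eq_iff]; rfl
  have hlow0 : PySem.Chars.lower (PySem.Chars.strip l) = [] ↔ PySem.Chars.strip l = [] := by
    simp [PySem.Chars.lower]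
  rw [lower_ofList]
  constructor
  · rintro ⟨h1, h2⟩
    exact ⟨fun h => h1 (hne.mpr h),
      fun hm => h2 ((mem_four_iff _).mpr (Or.inr hm))⟩
  · rintro ⟨h1, h2⟩
    refine ⟨fun h => h1 (hne.mp h), fun hm => ?_⟩
    rcases (mem_four_iff _).mp hm with h | h
    · exact h1 (hlow0.mp h)
    · exact h2 h

-- A's cleaning fold over pieces-as-strings is the pvEmit fold over the pieces
theorem cleanA_eq_foldl_pvEmit (ps : List (List Char)) (acc : List String) :
    (ps.map String.ofList).foldl (fun cleaned_items item =>
      if PySem.Str.strip item ≠ "" ∧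
          PySem.Str.lower (PySem.Str.strip item) ∉ (["", "n/a", "none", "null"] : List String)
      then cleaned_items ++ [PySem.Str.strip item] else cleaned_items) acc
    = ps.foldl pvEmit acc := by
  induction ps generalizing acc with
  | nil => rfl
  | cons p ps ih => simp only [List.map_cons, List.foldl_cons, ih, emitA_eq_pvEmit]

-- B's scanning loop computes the pvEmit fold over the pieces of splitAny
theorem loopB_spec (cs : List Char) :
    ∀ (acc : List String) (tok : List Char),
      pvEmit (cs.foldl (fun (st : List String × List Char) ch =>
          if ch ∈ pvDelims then (pvEmit st.1 st.2, []) else (st.1, st.2 ++ [ch])) (acc, tok)).1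
        (cs.foldl (fun (st : List String × List Char) ch =>
          if ch ∈ pvDelims then (pvEmit st.1 st.2, []) else (st.1, st.2 ++ [ch])) (acc, tok)).2
      = (mapHd (fun t => tok ++ t) (splitAny pvDelims cs)).foldl pvEmit acc := by
  induction cs with
  | nil => intro acc tok; simp [splitAny, mapHd]
  | cons c cs ih =>
    intro acc tok
    by_cases hc : c ∈ pvDelims
    · simp only [List.foldl_cons, if_pos hc]
      rw [ih (pvEmit acc tok) []]
      have hsp : splitAny pvDelims (c :: cs) = [] :: splitAny pvDelims cs := by
        simp [splitAny, hc]
      rw [mapHd_nil_append, hsp]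
      simp [mapHd]
    · simp only [List.foldl_cons, if_neg hc]
      rw [ih acc (tok ++ [c])]
      have hsp : splitAny pvDelims (c :: cs) = mapHd (c :: ·) (splitAny pvDelims cs) := by
        simp [splitAny, hc]
      rw [hsp]
      cases h : splitAny pvDelims cs with
      | nil => exact absurd h (splitAny_ne_nil _ _)
      | cons t ts => simp [mapHd]

-- A's four re-splitting passes compute splitAny over all four delimiters at once
theorem itemsA_step (cs : List Char) (sep : String) (d : Char) (hd : sep.toList = [d])
    (ds : List Char) :
    List.foldl (fun new_items (item : String) =>
        new_items ++ (PySem.Chars.splitOn item.toList sep.toList).map String.ofList) []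
      ((splitAny ds cs).map String.ofList)
    = (splitAny (ds ++ [d]) cs).map String.ofList := by
  rw [hd]
  rw [PySem.List.foldl_append_eq_flatMap
    (fun item : String => (PySem.Chars.splitOn item.toList [d]).map String.ofList)
    ((splitAny ds cs).map String.ofList) []]
  rw [List.flatMap_map]
  simp only [String.toList_ofList, splitOn_eq_splitAny]
  rw [List.nil_append, ← List.map_flatMap, flatMap_splitAny]

theorem itemsA_eq (cs : List Char) :
    (([",", ";", "|", "\n"] : List String).foldl (fun items delimiter =>
      items.foldl (fun new_items item =>
        new_items ++ (PySem.Chars.splitOn item.toList delimiter.toList).map String.ofList) [])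
      [String.ofList cs])
    = (splitAny pvDelims cs).map String.ofList := by
  simp only [List.foldl_cons, List.foldl_nil]
  have h0 : ([] ++ (PySem.Chars.splitOn (String.ofList cs).toList (",").toList).map String.ofList)
      = (splitAny [','] cs).map String.ofList := by
    rw [List.nil_append, String.toList_ofList, show (",").toList = [','] from rfl,
      splitOn_eq_splitAny]
  rw [h0]
  rw [itemsA_step cs ";" ';' rfl [',']]
  simp only [List.cons_append, List.nil_append]
  rw [itemsA_step cs "|" '|' rfl [',', ';']]
  simp only [List.cons_append, List.nil_append]
  rw [itemsA_step cs "\n" '\n' rfl [',', ';', '|']]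
  simp only [List.cons_append, List.nil_append]
  rfl

-- ===== VERDICT (by name: the statement is the Claim_ definition above) =====
theorem process_multi_value_field_py_spec : Claim_equal_process_multi_value_field_py := by
  intro value _
  unfold Spec_process_multi_value_field_py
  by_cases hguard : value = "" ∨ PySem.Str.lower value ∈ (["n/a", "none", "null", ""] : List String)
  · simp only [process_multi_value_field_py, process_multi_value_field_py_alt, if_pos hguard]
  · simp only [process_multi_value_field_py, process_multi_value_field_py_alt, if_neg hguard]
    have hitems : (([",", ";", "|", "\n"] : List String).foldl (fun items delimiter =>
        items.foldl (fun new_items item =>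
          new_items ++ (PySem.Chars.splitOn item.toList delimiter.toList).map String.ofList) [])
        [value]) = (splitAny pvDelims value.toList).map String.ofList := by
      conv_lhs => rw [show value = String.ofList value.toList from (by simp : String.ofList value.toList = value).symm]
      exact itemsA_eq value.toList
    rw [hitems, cleanA_eq_foldl_pvEmit]
    rw [loopB_spec value.toList [] [], mapHd_nil_append]
    split
    · rfl
    · next h => exact (not_not.mp h).symm
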